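-- pv_equiv track=rewrite | github.com/martinthebrain/dbus-shelly-evcharger | venus_evcharger/bootstrap/wizard_render.py | upsert_default_assignments
-- ===== SOURCE A (Python) =====
-- def upsert_default_assignments(text: str, assignments: dict[str, str]) -> str:
--     if not assignments:
--         return text
--     lines = text.splitlines()
--     remaining = dict(assignments)
--     rendered: list[str] = []
--     inserted = False
--     in_default_section = False
--
--     for line in lines:
--         if line == "[DEFAULT]":
--             in_default_section = True
--             rendered.append(line)
--             continue
--         rendered, inserted = _maybe_insert_default_assignments(
--             line,
--             rendered,
--             remaining,
--             inserted=inserted,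
--             in_default_section=in_default_section,
--         )
--         matched_key = _matching_default_assignment_key(line, remaining)
--         if matched_key is None:
--             rendered.append(line)
--             continue
--         rendered.append(_render_default_assignment_line(matched_key, remaining))
--     rendered.extend(_remaining_default_assignment_lines(rendered, remaining))
--     return "\n".join(rendered) + "\n"
--
-- def _maybe_insert_default_assignments(
--     line: str,
--     rendered: list[str],
--     remaining: dict[str, str],
--     *,
--     inserted: bool,
--     in_default_section: bool,
-- ) -> tuple[list[str], bool]:
--     if inserted or not in_default_section or not _is_section_header(line):
--         return rendered, inserted
--     rendered.extend(_render_remaining_default_assignments(remaining))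
--     remaining.clear()
--     return rendered, True
--
-- def _matching_default_assignment_key(line: str, remaining: dict[str, str]) -> str | None:
--     return next((key for key in remaining if line.startswith(f"{key}=")), None)
--
-- def _render_default_assignment_line(key: str, remaining: dict[str, str]) -> str:
--     return f"{key}={remaining.pop(key)}"
--
-- def _remaining_default_assignment_lines(rendered: list[str], remaining: dict[str, str]) -> list[str]:
--     if not remaining:
--         return []
--     lines: list[str] = []
--     if rendered and rendered[-1].strip():
--         lines.append("")
--     lines.extend(_render_remaining_default_assignments(remaining))
--     return lines
--
-- def _render_remaining_default_assignments(remaining: dict[str, str]) -> list[str]: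
--     return [f"{key}={value}" for key, value in remaining.items()]
--
-- def _is_section_header(line: str) -> bool:
--     return line.startswith("[") and line.endswith("]")
-- ===== SOURCE B (Python) =====
-- def upsert_default_assignments(text: str, assignments: dict[str, str]) -> str:
--     if not assignments:
--         return text
--     lines = text.splitlines()
--     # insertion point: first section header strictly after the first "[DEFAULT]" line
--     # (lines equal to "[DEFAULT]" never count as that header), or end of file
--     insert_idx = len(lines)
--     seen_default = False
--     for i, line in enumerate(lines):
--         if line == "[DEFAULT]":
--             seen_default = True
--         elif seen_default and line.startswith("[") and line.endswith("]"):
--             insert_idx = i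
--             break
--     remaining = dict(assignments)
--     head = []
--     for line in lines[:insert_idx]:
--         key = next((k for k in remaining if line.startswith(k + "=")), None)
--         if key is None:
--             head.append(line)
--         else:
--             head.append(f"{key}={remaining.pop(key)}")
--     extra = [f"{k}={v}" for k, v in remaining.items()]
--     if extra and insert_idx == len(lines) and head and head[-1].strip():
--         head.append("")
--     return "\n".join(head + extra + lines[insert_idx:]) + "\n"
-- ===== Notes on version B (the rewrite author's own statement) =====
-- stated objective: simpler
-- what changed: Replaces A's single stateful pass (inserted/in_default flags with a mid-loop flush helper) by a three-phase decomposition: first compute the insertion index (first section header after '[DEFAULT]', or end of file), then rewrite only the prefix lines[:insert_idx] popping matched keys, then splice the leftover assignments at the index.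
import Mathlib
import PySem

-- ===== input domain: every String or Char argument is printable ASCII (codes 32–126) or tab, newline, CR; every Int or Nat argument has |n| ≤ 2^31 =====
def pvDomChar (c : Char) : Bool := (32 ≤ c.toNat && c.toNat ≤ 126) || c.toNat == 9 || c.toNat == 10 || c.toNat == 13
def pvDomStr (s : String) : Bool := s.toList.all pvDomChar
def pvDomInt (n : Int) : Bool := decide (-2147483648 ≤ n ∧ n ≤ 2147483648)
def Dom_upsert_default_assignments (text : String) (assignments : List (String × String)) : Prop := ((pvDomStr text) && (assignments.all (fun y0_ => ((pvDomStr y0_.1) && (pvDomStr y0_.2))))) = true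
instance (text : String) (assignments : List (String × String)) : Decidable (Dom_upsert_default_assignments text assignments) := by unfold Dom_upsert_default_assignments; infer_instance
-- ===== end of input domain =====

-- B rewrites A's single stateful pass as: find the insertion index, rewrite the prefix, splice the leftovers (simpler decomposition, same cost).

-- ===== PORT A =====
def pvIsSectionHeaderA (line : String) : Bool :=
  PySem.Str.startswith line "[" && PySem.Str.endswith line "]"

def pvRenderRemainingA (remaining : PySem.Dict String String) : List String :=
  remaining.items.map (fun p => p.1 ++ "=" ++ p.2)

def pvMaybeInsertA (line : String) (rendered : List String) (remaining : PySem.Dict String String)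
    (inserted : Bool) (in_default_section : Bool) :
    List String × PySem.Dict String String × Bool :=
  if inserted || !in_default_section || !pvIsSectionHeaderA line then
    (rendered, remaining, inserted)
  else
    (rendered ++ pvRenderRemainingA remaining, PySem.Dict.empty, true)

def pvMatchKeyA (remaining : PySem.Dict String String) (line : String) : Option String :=
  remaining.keys.find? (fun k => PySem.Str.startswith line (k ++ "="))

def pvRemainingLinesA (rendered : List String) (remaining : PySem.Dict String String) : List String :=
  if remaining.items = [] then []
  else
    (if (match rendered.getLast? with
         | some l => PySem.Str.strip l != ""
         | none => false) then [""] else [])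
      ++ pvRenderRemainingA remaining

def pvLoopA : List String → List String → PySem.Dict String String → Bool → Bool →
    List String × PySem.Dict String String
  | [], rendered, remaining, _inserted, _in_default => (rendered, remaining)
  | line :: rest, rendered, remaining, inserted, in_default =>
    if line = "[DEFAULT]" then
      pvLoopA rest (rendered ++ [line]) remaining inserted true
    else
      match pvMaybeInsertA line rendered remaining inserted in_default with
      | (r1, rem1, ins1) =>
        match pvMatchKeyA rem1 line with
        | none => pvLoopA rest (r1 ++ [line]) rem1 ins1 in_default
        | some key =>
            pvLoopA rest (r1 ++ [key ++ "=" ++ rem1.getD key ""]) (rem1.erase key) ins1 in_default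

def upsert_default_assignments (text : String) (assignments : List (String × String)) : String :=
  if assignments = [] then text
  else
    let lines := PySem.Str.splitlines text
    match pvLoopA lines [] (PySem.Dict.ofList assignments) false false with
    | (rendered, remaining) =>
      PySem.Str.join "\n" (rendered ++ pvRemainingLinesA rendered remaining) ++ "\n"

-- ===== PORT B =====
def pvFindInsertB : List String → Bool → Nat
  | [], _seen => 0
  | line :: rest, seen =>
    if line = "[DEFAULT]" then pvFindInsertB rest true + 1
    else if seen && PySem.Str.startswith line "[" && PySem.Str.endswith line "]" then 0
    else pvFindInsertB rest seen + 1

def pvReplaceB : List String → PySem.Dict String String →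
    List String × PySem.Dict String String
  | [], remaining => ([], remaining)
  | line :: rest, remaining =>
    match remaining.keys.find? (fun k => PySem.Str.startswith line (k ++ "=")) with
    | none =>
        match pvReplaceB rest remaining with
        | (h, r) => (line :: h, r)
    | some key =>
        match pvReplaceB rest (remaining.erase key) with
        | (h, r) => ((key ++ "=" ++ remaining.getD key "") :: h, r)

def upsert_default_assignments_alt (text : String) (assignments : List (String × String)) : String :=
  if assignments = [] then text
  else
    let lines := PySem.Str.splitlines text
    let idx := pvFindInsertB lines false
    match pvReplaceB (lines.take idx) (PySem.Dict.ofList assignments) with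
    | (head, rem) =>
      let extra := rem.items.map (fun p => p.1 ++ "=" ++ p.2)
      let head2 :=
        if (extra != []) && (idx == lines.length)
            && (match head.getLast? with
                | some l => PySem.Str.strip l != ""
                | none => false)
        then head ++ [""] else head
      PySem.Str.join "\n" (head2 ++ extra ++ lines.drop idx) ++ "\n"

-- ===== PRECONDITION & SPEC =====
def Spec_upsert_default_assignments (text : String) (assignments : List (String × String)) (out : String) : Prop := out = upsert_default_assignments_alt text assignments
instance (text : String) (assignments : List (String × String)) (out : String) : Decidable (Spec_upsert_default_assignments text assignments out) := by unfold Spec_upsert_default_assignments; infer_instance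

-- ===== CLAIM (what is proved, stated in full; the proofs are below) =====
def Claim_equal_upsert_default_assignments : Prop := ∀ (text : String) (assignments : List (String × String)), Dom_upsert_default_assignments text assignments → Spec_upsert_default_assignments text assignments (upsert_default_assignments text assignments)

-- ===== LEMMAS AND PROOFS =====

lemma pv_no_eq_prefix_default (k : String) :
    PySem.Str.startswith "[DEFAULT]" (k ++ "=") = false := by
  rw [Bool.eq_false_iff]
  intro h
  rw [PySem.Str.startswith_eq] at h
  have hp := (PySem.Chars.startswith_iff _ _).mp h
  have hm : '=' ∈ ("[DEFAULT]".toList) := hp.subset (by simp)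
  exact absurd hm (by decide)

lemma pv_matchKey_default (rem : PySem.Dict String String) :
    pvMatchKeyA rem "[DEFAULT]" = none := by
  unfold pvMatchKeyA
  rw [List.find?_eq_none]
  intro k _
  rw [pv_no_eq_prefix_default]
  simp

lemma pv_loopA_empty (ls : List String) (R : List String) (ins indef : Bool) :
    pvLoopA ls R PySem.Dict.empty ins indef = (R ++ ls, PySem.Dict.empty) := by
  induction ls generalizing R ins indef with
  | nil => simp [pvLoopA]
  | cons line rest ih =>
    unfold pvLoopA
    by_cases hd : line = "[DEFAULT]"
    · simp [hd, ih]
    · simp only [hd, if_false]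
      unfold pvMaybeInsertA
      by_cases hc : (ins || !indef || !pvIsSectionHeaderA line) = true
      · simpa [hc, pvMatchKeyA] using ih (R ++ [line]) ins indef
      · simpa [hc, pvMatchKeyA, pvRenderRemainingA, PySem.Dict.empty] using ih (R ++ [line]) true indef

lemma pv_findB_le (ls : List String) (seen : Bool) : pvFindInsertB ls seen ≤ ls.length := by
  induction ls generalizing seen with
  | nil => simp [pvFindInsertB]
  | cons line rest ih =>
    unfold pvFindInsertB
    split_ifs <;> simp [ih]

lemma pv_matchKey_empty (line : String) :
    pvMatchKeyA PySem.Dict.empty line = none := by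
  simp [pvMatchKeyA]

lemma pv_replaceB_cons (line : String) (ls : List String) (rem : PySem.Dict String String) :
    pvReplaceB (line :: ls) rem =
      match pvMatchKeyA rem line with
      | none => (line :: (pvReplaceB ls rem).1, (pvReplaceB ls rem).2)
      | some key => ((key ++ "=" ++ rem.getD key "") :: (pvReplaceB ls (rem.erase key)).1,
          (pvReplaceB ls (rem.erase key)).2) := by
  rw [pvReplaceB]
  cases h : List.find? (fun k => PySem.Str.startswith line (k ++ "=")) rem.keys with
  | none =>
    have h' : pvMatchKeyA rem line = none := h
    rw [h']
  | some key =>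
    have h' : pvMatchKeyA rem line = some key := h
    rw [h']

lemma pv_loopA_eq (ls : List String) (R : List String) (rem : PySem.Dict String String)
    (indef : Bool) :
    pvLoopA ls R rem false indef =
      (if pvFindInsertB ls indef < ls.length
       then (R ++ (pvReplaceB (ls.take (pvFindInsertB ls indef)) rem).1
               ++ pvRenderRemainingA (pvReplaceB (ls.take (pvFindInsertB ls indef)) rem).2
               ++ ls.drop (pvFindInsertB ls indef), PySem.Dict.empty)
       else (R ++ (pvReplaceB ls rem).1, (pvReplaceB ls rem).2)) := by
  induction ls generalizing R rem indef with
  | nil => simp [pvLoopA, pvFindInsertB, pvReplaceB]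
  | cons line rest ih =>
    by_cases hd : line = "[DEFAULT]"
    · subst hd
      rw [pvLoopA, if_pos rfl, ih, pvFindInsertB, if_pos rfl]
      rw [List.take_succ_cons, List.drop_succ_cons, pv_replaceB_cons, pv_matchKey_default]
      by_cases hlt : pvFindInsertB rest true < rest.length
      · simp [hlt]
      · rw [pv_replaceB_cons, pv_matchKey_default]
        simp [hlt]
    · by_cases hc : (false || !indef || !pvIsSectionHeaderA line) = true
      · -- no flush at this line
        have hfind : pvFindInsertB (line :: rest) indef = pvFindInsertB rest indef + 1 := by
          rw [pvFindInsertB, if_neg hd, if_neg]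
          intro hcond
          simp only [Bool.and_eq_true] at hcond
          simp only [Bool.false_or, Bool.or_eq_true, Bool.not_eq_true'] at hc
          rcases hc with hc | hc
          · simp_all
          · unfold pvIsSectionHeaderA at hc
            simp only [Bool.and_eq_false_iff] at hc
            rcases hc with hc | hc <;> simp_all
        have hins : pvMaybeInsertA line R rem false indef = (R, rem, false) := by
          unfold pvMaybeInsertA
          rw [if_pos hc]
        rw [pvLoopA, if_neg hd, hins]
        dsimp only
        cases hm : pvMatchKeyA rem line with
        | none =>
          dsimp only
          rw [hfind, List.take_succ_cons, List.drop_succ_cons, pv_replaceB_cons, hm, ih]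
          by_cases hlt : pvFindInsertB rest indef < rest.length
          · simp [hlt]
          · rw [pv_replaceB_cons, hm]
            simp [hlt]
        | some key =>
          dsimp only
          rw [hfind, List.take_succ_cons, List.drop_succ_cons, pv_replaceB_cons, hm, ih]
          by_cases hlt : pvFindInsertB rest indef < rest.length
          · simp [hlt]
          · rw [pv_replaceB_cons, hm]
            simp [hlt]
      · -- flush at this section header
        cases indef with
        | false => exact absurd (by simp) hc
        | true =>
          cases hH : pvIsSectionHeaderA line with
          | false => exact absurd (by simp [hH]) hc
          | true =>
            have hsw := hH
            unfold pvIsSectionHeaderA at hsw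
            simp only [Bool.and_eq_true] at hsw
            have hfind : pvFindInsertB (line :: rest) true = 0 := by
              rw [pvFindInsertB, if_neg hd, hsw.1, hsw.2]
              simp
            have hins : pvMaybeInsertA line R rem false true
                = (R ++ pvRenderRemainingA rem, PySem.Dict.empty, true) := by
              unfold pvMaybeInsertA
              rw [hH]
              simp
            rw [pvLoopA, if_neg hd, hins]
            dsimp only
            rw [pv_matchKey_empty, pv_loopA_empty, hfind]
            simp [pvReplaceB]
lemma pv_ab_eq (text : String) (assignments : List (String × String)) :
    upsert_default_assignments text assignments = upsert_default_assignments_alt text assignments := by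
  unfold upsert_default_assignments upsert_default_assignments_alt
  by_cases hA : assignments = []
  · simp [hA]
  · rw [if_neg hA, if_neg hA]
    dsimp only
    rw [pv_loopA_eq]
    by_cases hlt : pvFindInsertB (PySem.Str.splitlines text) false < (PySem.Str.splitlines text).length
    · -- insertion before a later section header
      rw [if_pos hlt]
      rcases hpr : pvReplaceB ((PySem.Str.splitlines text).take
          (pvFindInsertB (PySem.Str.splitlines text) false)) (PySem.Dict.ofList assignments) with ⟨h, r⟩
      dsimp only
      have hidx : (pvFindInsertB (PySem.Str.splitlines text) false
          == (PySem.Str.splitlines text).length) = false := by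
        simp only [beq_eq_false_iff_ne, ne_eq]
        omega
      rw [hidx]
      simp [pvRemainingLinesA, pvRenderRemainingA, PySem.Dict.empty]
    · -- flush at end of file
      rw [if_neg hlt]
      have hle := pv_findB_le (PySem.Str.splitlines text) false
      have heq : pvFindInsertB (PySem.Str.splitlines text) false = (PySem.Str.splitlines text).length := by omega
      rw [heq, List.take_length, List.drop_length]
      rcases hpr : pvReplaceB (PySem.Str.splitlines text) (PySem.Dict.ofList assignments) with ⟨h, r⟩
      dsimp only
      rw [beq_self_eq_true]
      by_cases hr : r.items = []
      · simp [pvRemainingLinesA, hr]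
      · have hx : (r.items.map (fun p => p.1 ++ "=" ++ p.2) != []) = true := by
          simp [hr]
        rw [hx]
        simp only [Bool.true_and, pvRemainingLinesA, if_neg hr, pvRenderRemainingA]
        cases hb : (match h.getLast? with | some l => PySem.Str.strip l != "" | none => false) <;>
          simp [hb]

-- ===== VERDICT (by name: the statement is the Claim_ definition above) =====
theorem upsert_default_assignments_spec : Claim_equal_upsert_default_assignments := by
  intro text assignments _
  exact pv_ab_eq text assignments
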